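-- pv_equiv track=rewrite | github.com/ufeindt/advent-of-code-2024 | 05/puzzle_1.py | filter_valid_pages
-- ===== SOURCE A (Python) =====
-- def filter_valid_pages(
--     rules: list[tuple[int, int]], pages: list[list[int]], return_valid: bool = True
-- ) -> list[list[int]]:
--     filtered_pages = []
--     for page in pages:
--         valid = True
--         for rule in rules:
--             if (
--                 rule[0] in page
--                 and rule[1] in page
--                 and page.index(rule[0]) > page.index(rule[1])
--             ):
--                 valid = False
--                 break
--
--         if valid == return_valid:
--             filtered_pages.append(page)
--
--     return filtered_pages
-- ===== SOURCE B (Python) =====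
-- def filter_valid_pages(
--     rules: list[tuple[int, int]], pages: list[list[int]], return_valid: bool = True
-- ) -> list[list[int]]:
--     after_map = {}
--     for a, b in rules:
--         after_map.setdefault(a, set()).add(b)
--
--     filtered_pages = []
--     empty = set()
--     for page in pages:
--         valid = True
--         seen = set()
--         for x in page:
--             if x not in seen:
--                 if not after_map.get(x, empty).isdisjoint(seen):
--                     valid = False
--                     break
--                 seen.add(x)
--         if valid == return_valid:
--             filtered_pages.append(page)
--     return filtered_pages
-- ===== Notes on version B (the rewrite author's own statement) =====
-- stated objective: faster
-- what changed: B precomputes a dict mapping each rule's left element to the set of its right elements, then judges each page in one forward pass with a growing 'seen' set (checking each element only at its first occurrence), instead of rescanning every rule with repeated list-membership and .index calls per page.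
import Mathlib
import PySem

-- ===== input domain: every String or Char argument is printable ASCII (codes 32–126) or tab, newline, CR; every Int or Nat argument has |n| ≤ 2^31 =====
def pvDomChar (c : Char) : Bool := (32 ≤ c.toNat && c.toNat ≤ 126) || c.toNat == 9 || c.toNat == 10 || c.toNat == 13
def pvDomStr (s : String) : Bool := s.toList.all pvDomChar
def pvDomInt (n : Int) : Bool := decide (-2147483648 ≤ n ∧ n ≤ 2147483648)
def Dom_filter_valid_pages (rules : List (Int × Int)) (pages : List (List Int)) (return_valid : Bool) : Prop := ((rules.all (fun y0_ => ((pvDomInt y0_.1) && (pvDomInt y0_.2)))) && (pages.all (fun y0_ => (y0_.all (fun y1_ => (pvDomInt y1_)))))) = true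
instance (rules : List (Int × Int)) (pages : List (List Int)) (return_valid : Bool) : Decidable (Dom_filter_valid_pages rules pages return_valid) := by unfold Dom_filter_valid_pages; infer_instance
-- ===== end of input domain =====

-- B replaces A's per-page scan over all rules (with repeated `in` and `.index` passes)
-- by a prebuilt rule table and one forward pass per page with a growing `seen` set (objective: faster).

-- ===== PORT A =====
-- inner `for rule in rules` loop with break: valid stays true until a violated rule is found
def pvAValid (page : List Int) : List (Int × Int) → Bool
  | [] => true
  | r :: rs =>
    if page.contains r.1 && page.contains r.2 &&
        decide ((PySem.List.index? page r.1).getD 0 > (PySem.List.index? page r.2).getD 0) then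
      false
    else pvAValid page rs

def filter_valid_pages (rules : List (Int × Int)) (pages : List (List Int)) (return_valid : Bool) : List (List Int) :=
  pages.foldl (fun filtered_pages page =>
    if pvAValid page rules == return_valid then filtered_pages ++ [page] else filtered_pages) []

-- ===== PORT B =====
-- after_map.setdefault(a, set()).add(b)  ==  modify a with default empty set, adding b
def pvAfterMap (rules : List (Int × Int)) : PySem.Dict Int (PySem.Set Int) :=
  rules.foldl (fun d r => d.modify r.1 PySem.Set.empty (fun s => PySem.Set.add s r.2)) PySem.Dict.empty

-- `for x in page` loop with break, `seen` accumulating first occurrences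
def pvBScan (m : PySem.Dict Int (PySem.Set Int)) (seen : PySem.Set Int) : List Int → Bool
  | [] => true
  | x :: xs =>
    if PySem.Set.contains seen x then pvBScan m seen xs
    else if !(PySem.Set.isdisjoint (m.getD x PySem.Set.empty) seen) then false
    else pvBScan m (PySem.Set.add seen x) xs

def filter_valid_pages_alt (rules : List (Int × Int)) (pages : List (List Int)) (return_valid : Bool) : List (List Int) :=
  let after_map := pvAfterMap rules
  pages.foldl (fun filtered_pages page =>
    if pvBScan after_map PySem.Set.empty page == return_valid then filtered_pages ++ [page] else filtered_pages) []

-- ===== PRECONDITION & SPEC =====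
def Spec_filter_valid_pages (rules : List (Int × Int)) (pages : List (List Int)) (return_valid : Bool) (out : List (List Int)) : Prop := out = filter_valid_pages_alt rules pages return_valid
instance (rules : List (Int × Int)) (pages : List (List Int)) (return_valid : Bool) (out : List (List Int)) : Decidable (Spec_filter_valid_pages rules pages return_valid out) := by unfold Spec_filter_valid_pages; infer_instance

-- ===== CLAIM (what is proved, stated in full; the proofs are below) =====
def Claim_equal_filter_valid_pages : Prop := ∀ (rules : List (Int × Int)) (pages : List (List Int)) (return_valid : Bool), Dom_filter_valid_pages rules pages return_valid → Spec_filter_valid_pages rules pages return_valid (filter_valid_pages rules pages return_valid)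

-- ===== LEMMAS AND PROOFS =====

-- common characterisation: page violates (a, b) iff a occurs and b occurs strictly before the FIRST a
def pvBad (page : List Int) (a b : Int) : Prop := a ∈ page ∧ b ∈ page.takeWhile (· ≠ a)

lemma pvIdx_lt_iff (page : List Int) (a b : Int) (ha : a ∈ page) (hb : b ∈ page) :
    (List.idxOf? b page).getD 0 < (List.idxOf? a page).getD 0 ↔ b ∈ page.takeWhile (· ≠ a) := by
  induction page with
  | nil => simp at ha
  | cons x xs ih =>
    by_cases hxa : x = a
    · subst hxa
      simp [List.idxOf?_cons]
    · have hxa' : (x == a) = false := by simp [hxa]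
      have hax : a ∈ xs := (List.mem_cons.1 ha).resolve_left (fun h => hxa h.symm)
      by_cases hxb : x = b
      · subst hxb
        simp only [List.idxOf?_cons, hxa', List.takeWhile_cons, beq_self_eq_true, if_true]
        cases h : List.idxOf? a xs with
        | none => rw [List.idxOf?_eq_none_iff] at h; exact absurd hax (by simpa using h)
        | some k => simp [hxa]
      · have hxb' : (x == b) = false := by simp [hxb]
        have hbx : b ∈ xs := (List.mem_cons.1 hb).resolve_left (fun h => hxb h.symm)
        simp only [List.idxOf?_cons, hxa', hxb']
        rw [List.takeWhile_cons]
        cases ha' : List.idxOf? a xs with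
        | none => rw [List.idxOf?_eq_none_iff] at ha'; exact absurd hax (by simpa using ha')
        | some i =>
          cases hb' : List.idxOf? b xs with
          | none => rw [List.idxOf?_eq_none_iff] at hb'; exact absurd hbx (by simpa using hb')
          | some j =>
            have := ih hax hbx
            rw [ha', hb'] at this
            simp at this ⊢
            rw [← this]
            simp [hxa]
            omega

lemma pvACond_iff (page : List Int) (a b : Int) :
    (a ∈ page ∧ b ∈ page ∧ (PySem.List.index? page a).getD 0 > (PySem.List.index? page b).getD 0)
      ↔ pvBad page a b := by
  unfold pvBad
  simp only [PySem.List.index?_eq_idxOf?, gt_iff_lt]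
  constructor
  · rintro ⟨ha, hb, h⟩
    exact ⟨ha, (pvIdx_lt_iff page a b ha hb).1 h⟩
  · rintro ⟨ha, hb⟩
    have hbp : b ∈ page := (List.takeWhile_sublist _).subset hb
    exact ⟨ha, hbp, (pvIdx_lt_iff page a b ha hbp).2 hb⟩

lemma pvAValid_iff (page : List Int) (rules : List (Int × Int)) :
    pvAValid page rules = true ↔ ∀ r ∈ rules, ¬ pvBad page r.1 r.2 := by
  induction rules with
  | nil => simp [pvAValid]
  | cons r rs ih =>
    rw [pvAValid]
    split
    next h =>
      have hb : pvBad page r.1 r.2 := by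
        apply (pvACond_iff page r.1 r.2).1
        simpa [gt_iff_lt, and_assoc] using h
      simp only [Bool.false_eq_true, false_iff]
      intro hall
      exact hall r (List.mem_cons_self) hb
    next h =>
      have hnb : ¬ pvBad page r.1 r.2 := by
        intro hb
        apply h
        have := (pvACond_iff page r.1 r.2).2 hb
        simpa [gt_iff_lt, and_assoc] using this
      rw [ih]
      simp [hnb]

lemma pvAfterMap_aux (rules : List (Int × Int)) (d : PySem.Dict Int (PySem.Set Int)) (a b : Int) :
    b ∈ (rules.foldl (fun d r => d.modify r.1 PySem.Set.empty (fun s => PySem.Set.add s r.2)) d).getD a PySem.Set.empty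
      ↔ b ∈ d.getD a PySem.Set.empty ∨ (a, b) ∈ rules := by
  induction rules generalizing d with
  | nil => simp
  | cons r rs ih =>
    simp only [List.foldl_cons, ih, PySem.Dict.getD_modify, List.mem_cons, Prod.ext_iff]
    by_cases hra : a = r.1
    · simp [hra, PySem.Set.mem_add]
      tauto
    · simp [hra]

lemma pvAfterMap_mem (rules : List (Int × Int)) (a b : Int) :
    b ∈ (pvAfterMap rules).getD a PySem.Set.empty ↔ (a, b) ∈ rules := by
  rw [pvAfterMap, pvAfterMap_aux]
  simp [PySem.Set.empty]

lemma pvBScan_iff (m : PySem.Dict Int (PySem.Set Int)) (rest : List Int) (seen : PySem.Set Int) :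
    pvBScan m seen rest = true ↔
      ∀ a b, b ∈ m.getD a PySem.Set.empty → a ∈ rest → a ∉ seen →
        ¬ (b ∈ seen ∨ b ∈ rest.takeWhile (· ≠ a)) := by
  induction rest generalizing seen with
  | nil => simp [pvBScan]
  | cons x xs ih =>
    rw [pvBScan]
    by_cases hx : x ∈ seen
    · rw [if_pos ((PySem.Set.contains_iff seen x).mpr hx), ih]
      constructor
      · intro h a b hb ha has
        have hax : a ≠ x := fun he => has (he ▸ hx)
        rw [List.takeWhile_cons, if_pos (by simpa using Ne.symm hax)]
        have ha' : a ∈ xs := (List.mem_cons.1 ha).resolve_left hax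
        have := h a b hb ha' has
        simp only [List.mem_cons]
        rintro (hbs | hbx | hbw)
        · exact this (Or.inl hbs)
        · exact this (Or.inl (hbx ▸ hx))
        · exact this (Or.inr hbw)
      · intro h a b hb ha has
        have hax : a ≠ x := fun he => has (he ▸ hx)
        have := h a b hb (List.mem_cons_of_mem _ ha) has
        rw [List.takeWhile_cons, if_pos (by simpa using Ne.symm hax)] at this
        simp only [List.mem_cons] at this
        rintro (hbs | hbw)
        · exact this (Or.inl hbs)
        · exact this (Or.inr (Or.inr hbw))
    · rw [if_neg (by simp [PySem.Set.contains_iff, hx])]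
      by_cases hdis : PySem.Set.isdisjoint (m.getD x PySem.Set.empty) seen = true
      · rw [if_neg (by rw [hdis]; simp), ih]
        have hdis' : ∀ b ∈ m.getD x PySem.Set.empty, b ∉ seen :=
          (PySem.Set.isdisjoint_iff (m.getD x PySem.Set.empty) seen).mp hdis
        have hadd : ∀ y : Int, y ∈ PySem.Set.add seen x ↔ y ∈ seen ∨ y = x :=
          fun y => PySem.Set.mem_add seen x y
        constructor
        · intro h a b hb ha has
          by_cases hax : a = x
          · subst hax
            rw [List.takeWhile_cons, if_neg (by simp)]
            rintro (hbs | hbw)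
            · exact hdis' b hb hbs
            · simp at hbw
          · rw [List.takeWhile_cons, if_pos (by simpa using Ne.symm hax)]
            have ha' : a ∈ xs := (List.mem_cons.1 ha).resolve_left hax
            have has' : a ∉ PySem.Set.add seen x := fun h' => ((hadd a).mp h').elim has hax
            have := h a b hb ha' has'
            simp only [List.mem_cons]
            rintro (hbs | hbx | hbw)
            · exact this (Or.inl ((hadd b).mpr (Or.inl hbs)))
            · exact this (Or.inl ((hadd b).mpr (Or.inr hbx)))
            · exact this (Or.inr hbw)
        · intro h a b hb ha has'
          have hax : a ≠ x := fun he => has' ((hadd a).mpr (Or.inr he))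
          have has : a ∉ seen := fun h' => has' ((hadd a).mpr (Or.inl h'))
          have := h a b hb (List.mem_cons_of_mem _ ha) has
          rw [List.takeWhile_cons, if_pos (by simpa using Ne.symm hax)] at this
          simp only [List.mem_cons] at this
          rintro (hbs | hbw)
          · rcases (hadd b).mp hbs with h' | h'
            · exact this (Or.inl h')
            · exact this (Or.inr (Or.inl h'))
          · exact this (Or.inr (Or.inr hbw))
      · rw [if_pos (by simp only [Bool.not_eq_true] at hdis; rw [hdis]; rfl)]
        simp only [Bool.false_eq_true, false_iff]
        intro h
        have := (PySem.Set.isdisjoint_iff (m.getD x PySem.Set.empty) seen)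
        simp only [Bool.not_eq_true] at hdis
        have hne : ¬ ∀ y ∈ m.getD x PySem.Set.empty, y ∉ seen := by
          intro hall
          have h2 := this.mpr hall
          rw [hdis] at h2
          exact Bool.false_ne_true h2
        push_neg at hne
        obtain ⟨b, hb, hbs⟩ := hne
        exact h x b hb List.mem_cons_self hx (Or.inl hbs)

lemma pvValid_eq (rules : List (Int × Int)) (page : List Int) :
    pvAValid page rules = pvBScan (pvAfterMap rules) PySem.Set.empty page := by
  rw [Bool.eq_iff_iff, pvAValid_iff, pvBScan_iff]
  constructor
  · intro h a b hb ha _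
    have hr : (a, b) ∈ rules := (pvAfterMap_mem rules a b).1 hb
    have := h (a, b) hr
    simp only [pvBad, not_and] at this
    rintro (hbs | hbw)
    · simp [PySem.Set.empty] at hbs
    · exact this ha hbw
  · intro h r hr
    rintro ⟨ha, hbw⟩
    exact h r.1 r.2 ((pvAfterMap_mem rules r.1 r.2).2 (by simpa using hr)) ha
      (by simp [PySem.Set.empty]) (Or.inr hbw)

-- ===== VERDICT (by name: the statement is the Claim_ definition above) =====
theorem filter_valid_pages_spec : Claim_equal_filter_valid_pages := by
  intro rules pages return_valid _
  unfold Spec_filter_valid_pages filter_valid_pages filter_valid_pages_alt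
  simp only [pvValid_eq]
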